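-- pv_equiv track=rewrite | github.com/gtrivedi88/cqa-assessment | skills/cqa-assess/scripts/check-product-names.py | _is_inside_backticks
-- ===== SOURCE A (Python) =====
-- def _is_inside_backticks(line, match_start, match_end):
--     """Check if a match range falls inside backtick-delimited text."""
--     in_backtick = False
--     backtick_start = -1
--     for ci, ch in enumerate(line):
--         if ch != "`":
--             continue
--         if in_backtick:
--             if match_start > backtick_start and match_end <= ci:
--                 return True
--             in_backtick = False
--         else:
--             in_backtick = True
--             backtick_start = ci
--     return False
-- ===== SOURCE B (Python) =====
-- def _pairs(xs):
--     """Consecutive disjoint pairs of xs; a trailing unpaired element is dropped."""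
--     if len(xs) < 2:
--         return []
--     return [(xs[0], xs[1])] + _pairs(xs[2:])
--
--
-- def _is_inside_backticks(line, match_start, match_end):
--     """Check if a match range falls inside backtick-delimited text."""
--     positions = [i for i, ch in enumerate(line) if ch == "`"]
--     return any(match_start > open_ and match_end <= close_
--                for open_, close_ in _pairs(positions))
-- ===== Notes on version B (the rewrite author's own statement) =====
-- stated objective: alternative
-- what changed: B first collects all backtick positions, then checks each consecutive (open, close) pair from a structurally built pair list, instead of A's single stateful scan toggling an in_backtick flag with early return.
import Mathlib
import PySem

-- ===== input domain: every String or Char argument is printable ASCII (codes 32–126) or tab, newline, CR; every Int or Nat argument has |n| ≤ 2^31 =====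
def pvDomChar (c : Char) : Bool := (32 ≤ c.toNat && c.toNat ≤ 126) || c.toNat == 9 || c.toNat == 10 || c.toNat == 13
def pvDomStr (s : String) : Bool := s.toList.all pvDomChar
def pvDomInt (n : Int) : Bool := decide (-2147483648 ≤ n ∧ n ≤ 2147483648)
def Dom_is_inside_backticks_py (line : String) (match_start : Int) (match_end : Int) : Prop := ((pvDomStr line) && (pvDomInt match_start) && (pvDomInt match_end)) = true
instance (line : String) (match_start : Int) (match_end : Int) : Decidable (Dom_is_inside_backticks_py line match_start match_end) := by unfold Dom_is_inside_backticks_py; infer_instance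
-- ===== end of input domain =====

-- B replaces A's single stateful toggling scan by collecting backtick positions and
-- checking consecutive (open, close) pairs; same O(n) cost, different decomposition.

-- ===== PORT A =====
-- the 'for ci, ch in enumerate(line)' loop with state (in_backtick, backtick_start) and early return
def loopA (ms me : Int) : List (Int × Char) → Bool → Int → Bool
  | [], _, _ => false
  | (ci, ch) :: rest, inb, bs =>
    if ch ≠ '`' then loopA ms me rest inb bs
    else if inb then
      (if ms > bs ∧ me ≤ ci then true else loopA ms me rest false bs)
    else loopA ms me rest true ci

def is_inside_backticks_py (line : String) (match_start : Int) (match_end : Int) : Bool :=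
  loopA match_start match_end (PySem.List.enumerate line.toList) false (-1)

-- ===== PORT B =====
-- _pairs: consecutive disjoint pairs, trailing unpaired element dropped
def pairsB : List Int → List (Int × Int)
  | a :: b :: rest => (a, b) :: pairsB rest
  | _ => []

def is_inside_backticks_py_alt (line : String) (match_start : Int) (match_end : Int) : Bool :=
  -- positions = [i for i, ch in enumerate(line) if ch == "`"]
  let positions := ((PySem.List.enumerate line.toList).filter (fun p => p.2 == '`')).map (fun p => p.1)
  -- any(match_start > open_ and match_end <= close_ for open_, close_ in _pairs(positions))
  (pairsB positions).any (fun p => match_start > p.1 && match_end ≤ p.2)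

-- ===== PRECONDITION & SPEC =====
def Spec_is_inside_backticks_py (line : String) (match_start : Int) (match_end : Int) (out : Bool) : Prop := out = is_inside_backticks_py_alt line match_start match_end
instance (line : String) (match_start : Int) (match_end : Int) (out : Bool) : Decidable (Spec_is_inside_backticks_py line match_start match_end out) := by unfold Spec_is_inside_backticks_py; infer_instance

-- ===== CLAIM (what is proved, stated in full; the proofs are below) =====
def Claim_equal_is_inside_backticks_py : Prop := ∀ (line : String) (match_start : Int) (match_end : Int), Dom_is_inside_backticks_py line match_start match_end → Spec_is_inside_backticks_py line match_start match_end (is_inside_backticks_py line match_start match_end)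

-- ===== LEMMAS AND PROOFS =====

-- A's scan restricted to the backtick positions (the non-backtick branch is a no-op)
def loopP (ms me : Int) : List Int → Bool → Int → Bool
  | [], _, _ => false
  | ci :: rest, inb, bs =>
    if inb then (if ms > bs ∧ me ≤ ci then true else loopP ms me rest false bs)
    else loopP ms me rest true ci

theorem loopA_eq_loopP (ms me : Int) :
    ∀ (l : List (Int × Char)) (inb : Bool) (bs : Int),
      loopA ms me l inb bs
        = loopP ms me ((l.filter (fun p => p.2 == '`')).map (fun p => p.1)) inb bs := by
  intro l
  induction l with
  | nil => intro inb bs; rfl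
  | cons hd tl ih =>
    intro inb bs
    obtain ⟨ci, ch⟩ := hd
    by_cases h : ch = '`'
    · subst h
      cases inb <;> simp [loopA, loopP, ih]
    · simp [loopA, h, ih]

theorem loopP_false_eq_pairs (ms me : Int) :
    ∀ (ps : List Int) (bs : Int),
      loopP ms me ps false bs
        = (pairsB ps).any (fun p => ms > p.1 && me ≤ p.2) := by
  intro ps
  induction ps using pairsB.induct with
  | case1 a b rest ih =>
    intro bs
    simp only [loopP, pairsB, List.any_cons]
    by_cases h : ms > a ∧ me ≤ b
    · simp [h]
    · simp only [if_neg h, ih]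
      have : (decide (ms > a) && decide (me ≤ b)) = false := by
        rcases not_and_or.mp h with h' | h' <;> simp [h']
      simp [this]
  | case2 xs hxs =>
    intro bs
    match xs, hxs with
    | [], _ => rfl
    | [a], _ => rfl
    | a :: b :: rest, hxs => exact absurd rfl (hxs a b rest)

-- ===== VERDICT (by name: the statement is the Claim_ definition above) =====
theorem is_inside_backticks_py_spec : Claim_equal_is_inside_backticks_py := by
  intro line ms me _
  unfold Spec_is_inside_backticks_py is_inside_backticks_py is_inside_backticks_py_alt
  rw [loopA_eq_loopP, loopP_false_eq_pairs]
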